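-- pv_equiv track=rewrite | github.com/byJingL/Static-Code-Analyzer | code_analyzer.py | check_issues1
-- ===== SOURCE A (Python) =====
-- def space_counter(string):
--     """Return number of start spaces in given string."""
--     num = 0
--     for char in string:
--         if char == ' ':
--             num += 1
--         else:
--             break
--     return num
--
-- def check_issues1(data):
--     """
--     Return a dictionary contains issue01-06 for given file data with line number as keys.
--
--     :param data: list of strings
--     :return: dict = {
--         1: [issue1, issue2, ...],
--         2: [issue1, ...],
--         ...,
--     }
--     """
--     issue_dict = {}
--     for i in range(len(data)):
--         issue_on_line = []
--
--         if data[i] == '':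
--             continue
--
--         if issue_s001(data[i]):
--             issue_on_line.append('S001')
--
--         if issue_s002(data[i]):
--             issue_on_line.append('S002')
--
--         if issue_s003(data[i]):
--             issue_on_line.append('S003')
--
--         if issue_s004(data[i]):
--             issue_on_line.append('S004')
--
--         if issue_s005(data[i]):
--             issue_on_line.append('S005')
--
--         if i > 2 and data[i] != '':
--             if data[i - 1] == '' and data[i - 2] == '' and data[i - 3] == '':
--                 issue_on_line.append('S006')
--
--         issue_dict[i + 1] = issue_on_line
--
--     return issue_dict
--
-- def issue_s001(s):
--     """Return True if the length of the line > 79."""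
--     if len(s) > 79:
--         return True
--
-- def issue_s002(s):
--     """Return True if the indentation is not a multiple of four."""
--     count = space_counter(s)
--     if count % 4 != 0:
--         return True
--     return False
--
-- def issue_s003(s):
--     """Return True if there's unnecessary semicolon."""
--     if '#' in s:
--         if ';' in s.split('#')[0]:
--             return True
--     else:
--         if s[-1] == ';':
--             return True
--     return False
--
-- def issue_s004(s):
--     """Return True if there's less than two spaces before inline comments."""
--     if '#' in s:
--         if s[0] != '#':
--             part1 = s.split('#')[0]
--             if part1[-2:] != '  ':
--                 return True
--     return False
--
-- def issue_s005(s):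
--     """Return True if there's more than two blank lines preceding a code line"""
--     if '#' in s:
--         if s[0] == '#':
--             todo_check = s
--         else:
--             comment_index = s.index('#')
--             todo_check = s[comment_index:]
--
--         if 'todo' in todo_check.lower():
--             return True
--
--     return False
-- ===== SOURCE B (Python) =====
-- def check_issues1(data):
--     """Staged columnar passes: compute one boolean column per check over the
--     whole file (S006 via a forward run-length pass), then merge the columns
--     into the per-line issue lists for non-empty lines."""
--     col1 = [len(s) > 79 for s in data]
--     col2 = [(len(s) - len(s.lstrip(' '))) % 4 != 0 for s in data]
--     col3 = [(';' in s.split('#')[0]) if '#' in s else s.endswith(';') for s in data]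
--     col4 = ['#' in s and not s.startswith('#') and not s.split('#')[0].endswith('  ')
--             for s in data]
--     col5 = ['#' in s and 'todo' in s[s.find('#'):].lower() for s in data]
--     col6 = []
--     run = 0
--     for s in data:
--         col6.append(run >= 3)
--         run = run + 1 if s == '' else 0
--     codes = ('S001', 'S002', 'S003', 'S004', 'S005', 'S006')
--     result = {}
--     for i, line in enumerate(data):
--         if line != '':
--             result[i + 1] = [c for c, v in zip(
--                 codes, (col1[i], col2[i], col3[i], col4[i], col5[i], col6[i])) if v]
--     return result
-- ===== Notes on version B (the rewrite author's own statement) =====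
-- stated objective: alternative
-- what changed: B replaces A's single per-line loop with helper predicates and backward indexing data[i-1..i-3] by staged columnar passes: one boolean column per check S001-S005 computed over the whole file, a forward run-length pass for S006, then a final merge that zips the six columns into the issue list of each non-empty line.
import Mathlib
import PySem

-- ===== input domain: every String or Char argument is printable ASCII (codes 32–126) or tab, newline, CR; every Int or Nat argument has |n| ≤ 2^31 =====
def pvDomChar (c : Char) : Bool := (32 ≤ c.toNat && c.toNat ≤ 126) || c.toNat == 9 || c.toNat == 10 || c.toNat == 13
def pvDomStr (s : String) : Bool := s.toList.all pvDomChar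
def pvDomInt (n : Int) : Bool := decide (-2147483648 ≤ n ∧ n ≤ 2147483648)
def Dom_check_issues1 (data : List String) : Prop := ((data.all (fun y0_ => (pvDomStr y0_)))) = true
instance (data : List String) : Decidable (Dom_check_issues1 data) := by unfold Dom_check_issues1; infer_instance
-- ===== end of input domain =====

-- B replaces A's per-line loop (helper predicates + backward indexing data[i-1..i-3]) by staged
-- columnar passes: one boolean column per check, a run-length pass for S006, then a merge.

-- ===== PORT A =====
def space_counter_go : List Char → Int
  | [] => 0
  | c :: rest => if c = ' ' then 1 + space_counter_go rest else 0

def space_counter (s : String) : Int := space_counter_go s.toList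

def issue_s001 (s : String) : Bool :=
  if PySem.Str.len s > 79 then true else false

def issue_s002 (s : String) : Bool :=
  if PySem.Int.mod (space_counter s) 4 ≠ 0 then true else false

-- s.split('#')[0]: the split list is never empty and sep ≠ "", so getD/headD are exact
def issue_s003 (s : String) : Bool :=
  if PySem.Str.isIn "#" s then
    (if PySem.Str.isIn ";" (((PySem.Str.split? s "#").getD []).headD "") then true else false)
  else
    -- s[-1]: only called on non-empty s (guarded in check_issues1)
    (if PySem.Str.pyGet? s (-1) == some ';' then true else false)

def issue_s004 (s : String) : Bool :=
  if PySem.Str.isIn "#" s then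
    if ¬ (PySem.Str.pyGet? s 0 == some '#') then
      (if PySem.Str.slice (((PySem.Str.split? s "#").getD []).headD "") (some (-2)) none ≠ "  " then true else false)
    else false
  else false

-- s.index('#') ported as find: exact here since '#' ∈ s is guaranteed by the guard
def issue_s005 (s : String) : Bool :=
  if PySem.Str.isIn "#" s then
    let todo_check := if PySem.Str.pyGet? s 0 == some '#' then s
      else PySem.Str.slice s (some (PySem.Str.find s "#")) none
    if PySem.Str.isIn "todo" (PySem.Str.lower todo_check) then true else false
  else false

def lineA (data : List String) (i : Int) (s : String) : List String :=
  let issues : List String := []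
  let issues := if issue_s001 s then issues ++ ["S001"] else issues
  let issues := if issue_s002 s then issues ++ ["S002"] else issues
  let issues := if issue_s003 s then issues ++ ["S003"] else issues
  let issues := if issue_s004 s then issues ++ ["S004"] else issues
  let issues := if issue_s005 s then issues ++ ["S005"] else issues
  let issues := if i > 2 ∧ s ≠ "" then
      (if PySem.List.pyGetD data (i-1) "" = "" ∧ PySem.List.pyGetD data (i-2) "" = ""
          ∧ PySem.List.pyGetD data (i-3) "" = "" then issues ++ ["S006"] else issues)
    else issues
  issues

def stepA (data : List String) (d : PySem.Dict Int (List String)) (i : Int) :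
    PySem.Dict Int (List String) :=
  let s := PySem.List.pyGetD data i ""
  if s = "" then d
  else d.insert (i + 1) (lineA data i s)

def check_issues1 (data : List String) : List (Int × List String) :=
  ((PySem.List.pyRange 0 (PySem.List.len data) 1).foldl (stepA data) PySem.Dict.empty).items

-- ===== PORT B =====
-- per-line predicates of the five columnar comprehensions in Source B
def fB1 (s : String) : Bool := decide (PySem.Str.len s > 79)

-- line.lstrip(' ') ported by hand as dropWhile of spaces (exact for lstrip(' '))
def fB2 (s : String) : Bool :=
  decide (PySem.Int.mod (PySem.Str.len s - ((s.toList.dropWhile (fun c => c == ' ')).length : Int)) 4 ≠ 0)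

def fB3 (s : String) : Bool :=
  if PySem.Str.isIn "#" s then PySem.Str.isIn ";" (((PySem.Str.split? s "#").getD []).headD "")
  else PySem.Str.endswith s ";"

def fB4 (s : String) : Bool :=
  PySem.Str.isIn "#" s && !(PySem.Str.startswith s "#")
    && !(PySem.Str.endswith (((PySem.Str.split? s "#").getD []).headD "") "  ")

def fB5 (s : String) : Bool :=
  PySem.Str.isIn "#" s
    && PySem.Str.isIn "todo" (PySem.Str.lower (PySem.Str.slice s (some (PySem.Str.find s "#")) none))

def colB1 (data : List String) : List Bool := data.map fB1
def colB2 (data : List String) : List Bool := data.map fB2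
def colB3 (data : List String) : List Bool := data.map fB3
def colB4 (data : List String) : List Bool := data.map fB4
def colB5 (data : List String) : List Bool := data.map fB5

-- the run-length pass: append `run >= 3`, then update the run counter
def colB6 (data : List String) : List Bool :=
  (data.foldl (fun (st : Int × List Bool) s =>
      (if s = "" then st.1 + 1 else 0, st.2 ++ [decide (3 ≤ st.1)])) ((0 : Int), ([] : List Bool))).2

-- [c for c, v in zip(codes, vals) if v]
def mergeB (vals : List Bool) : List String :=
  (((["S001", "S002", "S003", "S004", "S005", "S006"]).zip vals).filter (fun p => p.2)).map Prod.fst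

-- the final merge loop; columns are in range at every index, so pyGetD is exact
def stepB (c1 c2 c3 c4 c5 c6 : List Bool) (d : PySem.Dict Int (List String)) (p : Int × String) :
    PySem.Dict Int (List String) :=
  if p.2 ≠ "" then
    d.insert (p.1 + 1) (mergeB [PySem.List.pyGetD c1 p.1 false, PySem.List.pyGetD c2 p.1 false,
      PySem.List.pyGetD c3 p.1 false, PySem.List.pyGetD c4 p.1 false,
      PySem.List.pyGetD c5 p.1 false, PySem.List.pyGetD c6 p.1 false])
  else d

def check_issues1_alt (data : List String) : List (Int × List String) :=
  ((PySem.List.enumerate data 0).foldl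
    (stepB (colB1 data) (colB2 data) (colB3 data) (colB4 data) (colB5 data) (colB6 data))
    PySem.Dict.empty).items

-- ===== PRECONDITION & SPEC =====
def Spec_check_issues1 (data : List String) (out : List (Int × List String)) : Prop := out = check_issues1_alt data
instance (data : List String) (out : List (Int × List String)) : Decidable (Spec_check_issues1 data out) := by unfold Spec_check_issues1; infer_instance

-- ===== CLAIM (what is proved, stated in full; the proofs are below) =====
def Claim_equal_check_issues1 : Prop := ∀ (data : List String), Dom_check_issues1 data → Spec_check_issues1 data (check_issues1 data)

-- ===== LEMMAS AND PROOFS =====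

-- trailing-blank count of a processed prefix: the value of B's run counter
def trailB (xs : List String) : Int := xs.foldl (fun t s => if s = "" then t + 1 else 0) 0

theorem trailB_append (xs : List String) (x : String) :
    trailB (xs ++ [x]) = if x = "" then trailB xs + 1 else 0 := by
  simp [trailB]

theorem trailB_eq (xs : List String) :
    trailB xs = ((xs.reverse.takeWhile (fun s => s == "")).length : Int) := by
  induction xs using List.reverseRecOn with
  | nil => simp [trailB]
  | append_singleton xs x ih =>
      rw [trailB_append, ih]
      by_cases hx : x = "" <;> simp [hx]

theorem tw3 (r : List String) :
    3 ≤ ((r.takeWhile (fun s => s == "")).length : Int) ↔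
      (2 < (r.length : Int) ∧ r.getD 0 "" = "" ∧ r.getD 1 "" = "" ∧ r.getD 2 "" = "") := by
  rcases r with _ | ⟨a, _ | ⟨b, _ | ⟨c, r⟩⟩⟩
  · simp
  · by_cases ha : a = "" <;> simp [List.takeWhile_cons, ha]
  · by_cases ha : a = "" <;> by_cases hb : b = "" <;>
      simp [List.takeWhile_cons, ha, hb]
  · by_cases ha : a = "" <;> by_cases hb : b = "" <;> by_cases hc : c = "" <;>
      simp [List.takeWhile_cons, ha, hb, hc] <;> omega

theorem blank3 (xs : List String) :
    ((xs.length : Int) > 2 ∧ PySem.List.pyGetD xs ((xs.length : Int) - 1) "" = ""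
      ∧ PySem.List.pyGetD xs ((xs.length : Int) - 2) "" = ""
      ∧ PySem.List.pyGetD xs ((xs.length : Int) - 3) "" = "") ↔ 3 ≤ trailB xs := by
  rw [trailB_eq, tw3]
  by_cases h : (2 : Int) < (xs.length : Int)
  · have hn : 2 < xs.length := by exact_mod_cast h
    have e : ∀ j : Nat, j < 3 →
        PySem.List.pyGetD xs ((xs.length : Int) - (j + 1)) "" = xs.reverse.getD j "" := by
      intro j hj
      have h1 : (0 : Int) ≤ (xs.length : Int) - (j + 1) := by omega
      rw [PySem.List.pyGetD_of_nonneg _ _ h1]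
      have h2 : ((xs.length : Int) - (j + 1)).toNat = xs.length - 1 - j := by omega
      rw [h2]
      have h3 : xs.length - 1 - j < xs.length := by omega
      have h4 : j < xs.reverse.length := by simp; omega
      rw [List.getD_eq_getElem _ _ h3, List.getD_eq_getElem _ _ h4, List.getElem_reverse]
    have e1 := e 0 (by omega); have e2 := e 1 (by omega); have e3 := e 2 (by omega)
    norm_num at e1 e2 e3
    rw [e1, e2, e3]
    simp [h]
  · constructor
    · rintro ⟨h1, -⟩; exact absurd h1 h
    · rintro ⟨h1, -⟩; exfalso; simp at h1; exact h (by exact_mod_cast h1)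

theorem pyGetD_append_of_lt {α : Type} (xs : List α) (x : α) (d : α) (i : Int)
    (h0 : 0 ≤ i) (h : i < (xs.length : Int)) :
    PySem.List.pyGetD (xs ++ [x]) i d = PySem.List.pyGetD xs i d := by
  rw [PySem.List.pyGetD_of_nonneg _ _ h0, PySem.List.pyGetD_of_nonneg _ _ h0]
  have hi : i.toNat < xs.length := by omega
  rw [List.getD_eq_getElem _ _ (by simp; omega), List.getD_eq_getElem _ _ hi,
    List.getElem_append_left]

theorem pyGetD_append_self {α : Type} (xs : List α) (x : α) (d : α) :
    PySem.List.pyGetD (xs ++ [x]) (xs.length : Int) d = x := by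
  rw [PySem.List.pyGetD_of_nonneg _ _ (by positivity)]
  rw [List.getD_eq_getElem _ _ (by simp)]
  simp

-- per-check equalities, all for non-empty lines
theorem space_counter_go_eq (cs : List Char) :
    space_counter_go cs = ((cs.takeWhile (fun c => c == ' ')).length : Int) := by
  induction cs with
  | nil => simp [space_counter_go]
  | cons c t ih =>
      by_cases hc : c = ' ' <;> simp [space_counter_go, List.takeWhile_cons, hc, ih] <;> omega

theorem c2_eq (s : String) :
    space_counter s = PySem.Str.len s - ((s.toList.dropWhile (fun c => c == ' ')).length : Int) := by
  have h := congrArg List.length (List.takeWhile_append_dropWhile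
    (p := fun c : Char => c == ' ') (l := s.toList))
  rw [List.length_append] at h
  rw [PySem.Str.len_eq]
  unfold space_counter
  rw [space_counter_go_eq]
  omega

theorem pyGet?_concat_neg_one (l : List Char) (a : Char) :
    PySem.List.pyGet? (l ++ [a]) (-1) = some a := by
  have hn : (l ++ [a]).length = l.length + 1 := by simp
  simp only [PySem.List.pyGet?, PySem.List.pyIdx?, hn]
  rw [if_neg (by omega), if_pos (by push_cast; omega)]
  have h1 : ((-(-1 : Int)).toNat) = 1 := by decide
  rw [h1]
  simp [List.getElem?_concat_length]

theorem suffix_singleton (l : List Char) (a c : Char) :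
    ([c] <:+ l ++ [a]) ↔ a = c := by
  constructor
  · rintro ⟨t, ht⟩
    have := congrArg List.getLast? ht
    simpa [List.getLast?_concat] using this.symm
  · rintro rfl; exact ⟨l, rfl⟩

theorem last_semi (s : String) (hs : s ≠ "") :
    (PySem.Str.pyGet? s (-1) == some ';') = PySem.Str.endswith s ";" := by
  have hne : s.toList ≠ [] := by intro h; exact hs (by simpa using h)
  rcases List.eq_nil_or_concat s.toList with h | ⟨l, a, h⟩
  · exact absurd h hne
  · rw [PySem.Str.pyGet?_eq, PySem.Str.endswith_eq]
    rw [show PySem.Chars.pyGet? s.toList (-1) = PySem.List.pyGet? s.toList (-1) from rfl]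
    rw [show (";" : String).toList = [';'] from rfl]
    rw [List.concat_eq_append] at h
    rw [h, pyGet?_concat_neg_one]
    rw [Bool.eq_iff_iff]
    simp only [beq_iff_eq, Option.some.injEq, PySem.Chars.endswith_iff, suffix_singleton]

theorem head_hash (s : String) (hs : s ≠ "") :
    (PySem.Str.pyGet? s 0 == some '#') = PySem.Str.startswith s "#" := by
  have hne : s.toList ≠ [] := by intro h; exact hs (by simpa using h)
  obtain ⟨c, t, h⟩ := List.exists_cons_of_ne_nil hne
  rw [PySem.Str.pyGet?_eq, PySem.Str.startswith_eq]
  rw [show PySem.Chars.pyGet? s.toList 0 = PySem.List.pyGet? s.toList 0 from rfl]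
  rw [show ("#" : String).toList = ['#'] from rfl]
  rw [h]
  rw [show PySem.List.pyGet? (c :: t) 0 = some c from by
    simp [PySem.List.pyGet?, PySem.List.pyIdx?]]
  rw [Bool.eq_iff_iff]
  simp only [beq_iff_eq, Option.some.injEq, PySem.Chars.startswith_iff, List.cons_prefix_cons]
  constructor
  · intro hx; exact ⟨hx.symm, List.nil_prefix⟩
  · rintro ⟨hx, -⟩; exact hx.symm

theorem slice_neg_two (cs : List Char) :
    (PySem.List.slice cs (some (-2)) none = [' ', ' ']) ↔ [' ', ' '] <:+ cs := by
  simp only [PySem.List.slice, PySem.List.clampIdx]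
  by_cases h : cs.length < 2
  · rw [if_pos (by omega), if_pos (by push_cast; omega)]
    simp only [Int.toNat_zero, List.drop_zero]
    constructor
    · intro he; exfalso; have := congrArg List.length he; simp at this; omega
    · intro hs; exfalso; have := hs.length_le; simp at this; omega
  · rw [if_pos (by omega), if_neg (by push_cast; omega)]
    have ha : ((cs.length : Int) + (-2)).toNat = cs.length - 2 := by omega
    rw [ha]
    have hlen : (cs.drop (cs.length - 2)).length = 2 := by
      rw [List.length_drop]; omega
    have htake : cs.length - (cs.length - 2) = 2 := by omega
    rw [htake, List.take_of_length_le (by rw [hlen])]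
    constructor
    · intro he; rw [← he]; exact List.drop_suffix _ _
    · rintro ⟨p, hp⟩
      rw [← hp]
      have hpl : (p ++ [' ', ' ']).length - 2 = p.length := by simp
      rw [hpl, List.drop_left]

theorem slice2_eq (t : String) :
    (PySem.Str.slice t (some (-2)) none = "  ") ↔ PySem.Str.endswith t "  " = true := by
  rw [← String.toList_inj, PySem.Str.toList_slice, PySem.Str.endswith_eq]
  rw [show ("  " : String).toList = [' ', ' '] from rfl]
  rw [show PySem.Chars.slice t.toList (some (-2)) none
      = PySem.List.slice t.toList (some (-2)) none from rfl]
  rw [PySem.Chars.endswith_iff]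
  exact slice_neg_two t.toList

theorem todo_slice (s : String) (hh : PySem.Str.isIn "#" s = true)
    (h0 : PySem.Str.pyGet? s 0 == some '#') :
    PySem.Str.slice s (some (PySem.Str.find s "#")) none = s := by
  have hfind0 : PySem.Str.find s "#" = 0 := by
    rw [PySem.Str.find_eq, show ("#" : String).toList = ['#'] from rfl]
    have hnonneg : 0 ≤ PySem.Chars.find s.toList ['#'] := by
      rw [PySem.Chars.find_nonneg_iff, ← PySem.Chars.isIn_iff_infix]
      rw [PySem.Str.isIn_eq, show ("#" : String).toList = ['#'] from rfl] at hh
      exact hh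
    have hpre : ['#'] <+: s.toList := by
      have hne : s.toList ≠ [] := by
        intro h
        rw [PySem.Str.pyGet?_eq] at h0
        simp [h, PySem.Chars.pyGet?_eq_listPyGet?, PySem.List.pyGet?, PySem.List.pyIdx?] at h0
      obtain ⟨c, t, h⟩ := List.exists_cons_of_ne_nil hne
      rw [PySem.Str.pyGet?_eq, h,
        show PySem.Chars.pyGet? (c :: t) 0 = some c from by
          simp [PySem.Chars.pyGet?_eq_listPyGet?, PySem.List.pyGet?, PySem.List.pyIdx?]] at h0
      simp at h0
      rw [h, h0, List.cons_prefix_cons]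
      exact ⟨rfl, List.nil_prefix⟩
    rcases (PySem.Chars.find_spec hnonneg) with ⟨-, hmin⟩
    by_contra hne0
    have hpos : 0 < (PySem.Chars.find s.toList ['#']).toNat := by omega
    exact hmin 0 hpos (by simpa using hpre)
  rw [hfind0, ← String.toList_inj, PySem.Str.toList_slice,
    show PySem.Chars.slice s.toList (some 0) none
      = PySem.List.slice s.toList (some 0) none from rfl,
    PySem.List.slice_from _ (le_refl 0)]
  simp

theorem if_tf {p : Prop} [Decidable p] : (if p then true else false) = decide p := by
  split_ifs with h
  · exact (decide_eq_true h).symm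
  · exact (decide_eq_false h).symm

theorem if_bool (b : Bool) : (if b = true then true else false) = b := by cases b <;> rfl

theorem e1 (s : String) : issue_s001 s = fB1 s := by
  unfold issue_s001 fB1; rw [if_tf]

theorem e2 (s : String) : issue_s002 s = fB2 s := by
  unfold issue_s002 fB2; rw [c2_eq, if_tf]

theorem e3 (s : String) (hs : s ≠ "") : issue_s003 s = fB3 s := by
  unfold issue_s003 fB3
  by_cases hh : PySem.Str.isIn "#" s = true
  · rw [if_pos hh, if_pos hh, if_bool]
  · rw [if_neg hh, if_neg hh, if_bool, last_semi s hs]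

theorem e4 (s : String) (hs : s ≠ "") : issue_s004 s = fB4 s := by
  unfold issue_s004 fB4
  by_cases hh : PySem.Str.isIn "#" s = true
  · rw [if_pos hh, hh, head_hash s hs]
    cases h0 : PySem.Str.startswith s "#"
    · rw [if_pos (by decide : ¬false = true)]
      have hsl := slice2_eq (((PySem.Str.split? s "#").getD []).headD "")
      cases hb : PySem.Str.endswith (((PySem.Str.split? s "#").getD []).headD "") "  "
      · have hne : PySem.Str.slice (((PySem.Str.split? s "#").getD []).headD "") (some (-2)) none ≠ "  " := by
          intro he; rw [hsl] at he; rw [he] at hb; cases hb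
        rw [if_pos hne]; rfl
      · have heq := hsl.mpr hb
        rw [if_neg (not_not_intro heq)]; rfl
    · rw [if_neg (by decide : ¬(¬true = true))]; rfl
  · rw [if_neg hh, Bool.eq_false_iff.mpr hh]; rfl

theorem e5 (s : String) (hs : s ≠ "") : issue_s005 s = fB5 s := by
  unfold issue_s005 fB5
  by_cases hh : PySem.Str.isIn "#" s = true
  · rw [if_pos hh, hh]
    by_cases h0 : (PySem.Str.pyGet? s 0 == some '#') = true
    · rw [todo_slice s hh h0]
      simp only [h0, eq_self_iff_true, if_true]
      rw [if_bool, Bool.true_and]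
    · have h0' : (PySem.Str.pyGet? s 0 == some '#') = false := Bool.eq_false_iff.mpr h0
      simp only [h0', Bool.false_eq_true, if_false]
      rw [if_bool, Bool.true_and]
  · rw [if_neg hh, Bool.eq_false_iff.mpr hh]; rfl

def checksA (s : String) : List String :=
  let issues : List String := []
  let issues := if issue_s001 s then issues ++ ["S001"] else issues
  let issues := if issue_s002 s then issues ++ ["S002"] else issues
  let issues := if issue_s003 s then issues ++ ["S003"] else issues
  let issues := if issue_s004 s then issues ++ ["S004"] else issues
  let issues := if issue_s005 s then issues ++ ["S005"] else issues
  issues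

theorem lineA_split (data : List String) (i : Int) (s : String) :
    lineA data i s = checksA s ++
      (if i > 2 ∧ s ≠ "" ∧ PySem.List.pyGetD data (i-1) "" = "" ∧ PySem.List.pyGetD data (i-2) "" = ""
          ∧ PySem.List.pyGetD data (i-3) "" = "" then ["S006"] else []) := by
  unfold lineA checksA
  by_cases h1 : i > 2 <;> by_cases h2 : s = "" <;>
    by_cases hB : PySem.List.pyGetD data (i-1) "" = "" ∧ PySem.List.pyGetD data (i-2) "" = ""
        ∧ PySem.List.pyGetD data (i-3) "" = "" <;>
    simp [h1, h2, hB]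

theorem mergeB_eqn (b1 b2 b3 b4 b5 b6 : Bool) :
    mergeB [b1, b2, b3, b4, b5, b6] =
      (if b1 then ["S001"] else []) ++ (if b2 then ["S002"] else []) ++
      (if b3 then ["S003"] else []) ++ (if b4 then ["S004"] else []) ++
      (if b5 then ["S005"] else []) ++ (if b6 then ["S006"] else []) := by
  cases b1 <;> cases b2 <;> cases b3 <;> cases b4 <;> cases b5 <;> cases b6 <;> rfl

theorem checksA_merge (s : String) :
    checksA s = (if issue_s001 s then ["S001"] else []) ++ (if issue_s002 s then ["S002"] else []) ++
      (if issue_s003 s then ["S003"] else []) ++ (if issue_s004 s then ["S004"] else []) ++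
      (if issue_s005 s then ["S005"] else []) := by
  unfold checksA
  cases h1 : issue_s001 s <;> cases h2 : issue_s002 s <;> cases h3 : issue_s003 s <;>
    cases h4 : issue_s004 s <;> cases h5 : issue_s005 s <;> simp [h1, h2, h3, h4, h5]

theorem col6_fst (xs : List String) : ∀ (t : Int) (acc : List Bool),
    (xs.foldl (fun (st : Int × List Bool) s =>
        (if s = "" then st.1 + 1 else 0, st.2 ++ [decide (3 ≤ st.1)])) (t, acc)).1
      = xs.foldl (fun t s => if s = "" then t + 1 else 0) t := by
  induction xs with
  | nil => intro t acc; rfl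
  | cons y ys ih => intro t acc; simp only [List.foldl_cons]; exact ih _ _

theorem colB6_append (xs : List String) (x : String) :
    colB6 (xs ++ [x]) = colB6 xs ++ [decide (3 ≤ trailB xs)] := by
  unfold colB6
  rw [List.foldl_append]
  simp only [List.foldl_cons, List.foldl_nil]
  rw [col6_fst]
  rfl

theorem colB6_length (xs : List String) : (colB6 xs).length = xs.length := by
  induction xs using List.reverseRecOn with
  | nil => rfl
  | append_singleton xs x ih => rw [colB6_append]; simp [ih]

theorem main_fold (xs : List String) :
    (PySem.List.enumerate xs 0).foldl
        (stepB (colB1 xs) (colB2 xs) (colB3 xs) (colB4 xs) (colB5 xs) (colB6 xs))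
        PySem.Dict.empty
      = (PySem.List.pyRange 0 (PySem.List.len xs) 1).foldl (stepA xs) PySem.Dict.empty := by
  induction xs using List.reverseRecOn with
  | nil => rfl
  | append_singleton xs x ih =>
      have hc1 : colB1 (xs ++ [x]) = colB1 xs ++ [fB1 x] := by simp [colB1]
      have hc2 : colB2 (xs ++ [x]) = colB2 xs ++ [fB2 x] := by simp [colB2]
      have hc3 : colB3 (xs ++ [x]) = colB3 xs ++ [fB3 x] := by simp [colB3]
      have hc4 : colB4 (xs ++ [x]) = colB4 xs ++ [fB4 x] := by simp [colB4]
      have hc5 : colB5 (xs ++ [x]) = colB5 xs ++ [fB5 x] := by simp [colB5]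
      have hc6 := colB6_append xs x
      have hlen1 : (colB1 xs).length = xs.length := by simp [colB1]
      have hlen2 : (colB2 xs).length = xs.length := by simp [colB2]
      have hlen3 : (colB3 xs).length = xs.length := by simp [colB3]
      have hlen4 : (colB4 xs).length = xs.length := by simp [colB4]
      have hlen5 : (colB5 xs).length = xs.length := by simp [colB5]
      have hlen6 := colB6_length xs
      rw [PySem.List.enumerate_append, List.foldl_append, hc1, hc2, hc3, hc4, hc5, hc6]
      have hcongB : (PySem.List.enumerate xs 0).foldl
          (stepB (colB1 xs ++ [fB1 x]) (colB2 xs ++ [fB2 x]) (colB3 xs ++ [fB3 x])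
            (colB4 xs ++ [fB4 x]) (colB5 xs ++ [fB5 x]) (colB6 xs ++ [decide (3 ≤ trailB xs)]))
          PySem.Dict.empty
        = (PySem.List.enumerate xs 0).foldl
          (stepB (colB1 xs) (colB2 xs) (colB3 xs) (colB4 xs) (colB5 xs) (colB6 xs))
          PySem.Dict.empty := by
        apply PySem.List.foldl_congr_mem
        intro acc p hp
        rw [PySem.List.mem_enumerate_iff] at hp
        obtain ⟨k, hk, rfl⟩ := hp
        have h0 : (0 : Int) ≤ 0 + (k : Int) := by positivity
        have hklt : 0 + (k : Int) < (xs.length : Int) := by push_cast; omega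
        simp only [stepB]
        rw [pyGetD_append_of_lt _ _ _ _ h0 (by rw [hlen1] at *; exact hklt),
          pyGetD_append_of_lt _ _ _ _ h0 (by rw [hlen2] at *; exact hklt),
          pyGetD_append_of_lt _ _ _ _ h0 (by rw [hlen3] at *; exact hklt),
          pyGetD_append_of_lt _ _ _ _ h0 (by rw [hlen4] at *; exact hklt),
          pyGetD_append_of_lt _ _ _ _ h0 (by rw [hlen5] at *; exact hklt),
          pyGetD_append_of_lt _ _ _ _ h0 (by rw [hlen6] at *; exact hklt)]
      rw [hcongB, ih]
      have hlenA : PySem.List.len (xs ++ [x]) = PySem.List.len xs + 1 := by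
        simp [PySem.List.len]
      rw [hlenA, PySem.List.pyRange_one_succ_right (by simp [PySem.List.len]), List.foldl_append]
      have hcongA : (PySem.List.pyRange 0 (PySem.List.len xs) 1).foldl (stepA (xs ++ [x])) PySem.Dict.empty
          = (PySem.List.pyRange 0 (PySem.List.len xs) 1).foldl (stepA xs) PySem.Dict.empty := by
        apply PySem.List.foldl_congr_mem
        intro acc i hi
        rw [PySem.List.mem_pyRange_one] at hi
        have hilt : i < (xs.length : Int) := by simpa [PySem.List.len] using hi.2
        simp only [stepA]
        rw [pyGetD_append_of_lt xs x "" i hi.1 hilt]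
        by_cases hsi : PySem.List.pyGetD xs i "" = ""
        · simp [hsi]
        · have hA : lineA (xs ++ [x]) i (PySem.List.pyGetD xs i "") = lineA xs i (PySem.List.pyGetD xs i "") := by
            rw [lineA_split, lineA_split]
            by_cases hC : i > 2
            · rw [pyGetD_append_of_lt xs x "" (i-1) (by omega) (by omega),
                pyGetD_append_of_lt xs x "" (i-2) (by omega) (by omega),
                pyGetD_append_of_lt xs x "" (i-3) (by omega) (by omega)]
            · rw [if_neg (by tauto), if_neg (by tauto)]
          simp [hsi, hA]
      rw [hcongA]
      -- last element
      rw [show PySem.List.enumerate [x] (0 + (xs.length : Int)) = [((0 + (xs.length : Int) : Int), x)] from rfl]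
      simp only [List.foldl_cons, List.foldl_nil]
      have hself : PySem.List.pyGetD (xs ++ [x]) (PySem.List.len xs) "" = x := by
        simpa [PySem.List.len] using pyGetD_append_self xs x ""
      by_cases hx : x = ""
      · simp [stepA, stepB, hself, hx]
      · have h6 : (PySem.List.len xs > 2 ∧ x ≠ ""
            ∧ PySem.List.pyGetD (xs ++ [x]) (PySem.List.len xs - 1) "" = ""
            ∧ PySem.List.pyGetD (xs ++ [x]) (PySem.List.len xs - 2) "" = ""
            ∧ PySem.List.pyGetD (xs ++ [x]) (PySem.List.len xs - 3) "" = "") ↔ 3 ≤ trailB xs := by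
          constructor
          · rintro ⟨h1, -, h2, h3, h4⟩
            have h1' : (2 : Int) < (xs.length : Int) := by simpa [PySem.List.len] using h1
            simp only [PySem.List.len] at h2 h3 h4
            rw [pyGetD_append_of_lt xs x "" _ (by omega) (by omega)] at h2
            rw [pyGetD_append_of_lt xs x "" _ (by omega) (by omega)] at h3
            rw [pyGetD_append_of_lt xs x "" _ (by omega) (by omega)] at h4
            exact (blank3 xs).mp ⟨by omega, h2, h3, h4⟩
          · intro h1
            obtain ⟨hgt, b1, b2, b3⟩ := (blank3 xs).mpr h1
            refine ⟨by simpa [PySem.List.len] using hgt, hx, ?_, ?_, ?_⟩ <;>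
                simp only [PySem.List.len]
            · rw [pyGetD_append_of_lt xs x "" _ (by omega) (by omega)]; exact b1
            · rw [pyGetD_append_of_lt xs x "" _ (by omega) (by omega)]; exact b2
            · rw [pyGetD_append_of_lt xs x "" _ (by omega) (by omega)]; exact b3
        have hg1 : PySem.List.pyGetD (colB1 xs ++ [fB1 x]) (0 + (xs.length : Int)) false = fB1 x := by
          rw [show (0 + (xs.length : Int)) = ((colB1 xs).length : Int) by rw [hlen1]; ring]
          exact pyGetD_append_self _ _ _
        have hg2 : PySem.List.pyGetD (colB2 xs ++ [fB2 x]) (0 + (xs.length : Int)) false = fB2 x := by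
          rw [show (0 + (xs.length : Int)) = ((colB2 xs).length : Int) by rw [hlen2]; ring]
          exact pyGetD_append_self _ _ _
        have hg3 : PySem.List.pyGetD (colB3 xs ++ [fB3 x]) (0 + (xs.length : Int)) false = fB3 x := by
          rw [show (0 + (xs.length : Int)) = ((colB3 xs).length : Int) by rw [hlen3]; ring]
          exact pyGetD_append_self _ _ _
        have hg4 : PySem.List.pyGetD (colB4 xs ++ [fB4 x]) (0 + (xs.length : Int)) false = fB4 x := by
          rw [show (0 + (xs.length : Int)) = ((colB4 xs).length : Int) by rw [hlen4]; ring]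
          exact pyGetD_append_self _ _ _
        have hg5 : PySem.List.pyGetD (colB5 xs ++ [fB5 x]) (0 + (xs.length : Int)) false = fB5 x := by
          rw [show (0 + (xs.length : Int)) = ((colB5 xs).length : Int) by rw [hlen5]; ring]
          exact pyGetD_append_self _ _ _
        have hg6 : PySem.List.pyGetD (colB6 xs ++ [decide (3 ≤ trailB xs)]) (0 + (xs.length : Int)) false
            = decide (3 ≤ trailB xs) := by
          rw [show (0 + (xs.length : Int)) = ((colB6 xs).length : Int) by rw [hlen6]; ring]
          exact pyGetD_append_self _ _ _
        have hval : lineA (xs ++ [x]) (PySem.List.len xs) x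
            = mergeB [fB1 x, fB2 x, fB3 x, fB4 x, fB5 x, decide (3 ≤ trailB xs)] := by
          rw [lineA_split, checksA_merge, mergeB_eqn,
            e1 x, e2 x, e3 x hx, e4 x hx, e5 x hx]
          congr 1
          rw [if_congr h6 rfl rfl]
          by_cases h : 3 ≤ trailB xs
          · rw [if_pos h, if_pos (by simp [h])]
          · rw [if_neg h, if_neg (by simp [h])]
        simp only [stepA, stepB, hself]
        rw [if_neg hx, if_pos (by exact hx), hg1, hg2, hg3, hg4, hg5, hg6, ← hval]
        have hkey : (0 : Int) + (xs.length : Int) + 1 = PySem.List.len xs + 1 := by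
          simp [PySem.List.len]
        rw [hkey]

-- ===== VERDICT (by name: the statement is the Claim_ definition above) =====
theorem check_issues1_spec : Claim_equal_check_issues1 := by
  intro data _
  unfold Spec_check_issues1 check_issues1 check_issues1_alt
  rw [main_fold data]
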